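-- pv_equiv track=rewrite | github.com/Adnene93/FSSD | FSSD/enumerator/enumerator_attribute_complex.py | compute_tree_from_d
-- ===== SOURCE A (Python) =====
-- def compute_tree_from_d(ds):
-- 	tree_d={'':{'children':set()}}
-- 	d=sorted(ds)
-- 	for k in range(0,len(d)):
-- 		#all_p=all_parents_tag(d[k])
-- 		v=d[k].split('.')
-- 		all_p=[''] + ['.'.join(v[0:i+1]) for i in range(len(v))]
-- 		for i in range(1,len(all_p)):
-- 			if all_p[i] not in tree_d:
-- 				tree_d[all_p[i]]={'children':set()}
-- 				tree_d[all_p[i-1]]['children']|={all_p[i]}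
-- 	return tree_d
-- ===== SOURCE B (Python) =====
-- def compute_tree_from_d(ds):
--     # pass 1: map every node (dotted prefix) to its parent, first occurrence wins
--     parent = {}
--     for tag in sorted(ds):
--         parts = tag.split('.')
--         p = parts[0]
--         parent.setdefault(p, '')
--         for part in parts[1:]:
--             q = p + '.' + part
--             parent.setdefault(q, p)
--             p = q
--     # pass 2: build the tree from the parent relation
--     tree = {'': {'children': set()}}
--     for node, par in parent.items():
--         if node:
--             tree.setdefault(node, {'children': set()})
--             tree[par]['children'].add(node)
--     return tree
-- ===== Notes on version B (the rewrite author's own statement) =====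
-- stated objective: alternative
-- what changed: A builds the tree in one nested loop, testing membership in the growing tree dict to decide linking; B decomposes into two passes: first extract a node-to-parent map (first occurrence wins) from the incremental dotted prefixes, then build the tree by a single scan over that map, linking each non-root node to its recorded parent.
import Mathlib
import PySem

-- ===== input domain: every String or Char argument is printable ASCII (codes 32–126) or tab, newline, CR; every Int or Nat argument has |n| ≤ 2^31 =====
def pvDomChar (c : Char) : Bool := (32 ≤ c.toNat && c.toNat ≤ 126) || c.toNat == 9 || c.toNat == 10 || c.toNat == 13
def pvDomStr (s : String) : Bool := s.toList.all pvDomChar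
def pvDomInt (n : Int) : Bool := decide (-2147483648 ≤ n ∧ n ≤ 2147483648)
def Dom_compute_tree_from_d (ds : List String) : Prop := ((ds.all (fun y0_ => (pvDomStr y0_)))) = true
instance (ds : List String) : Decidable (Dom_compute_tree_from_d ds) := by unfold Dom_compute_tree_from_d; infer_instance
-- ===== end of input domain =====

-- B replaces A's single nested loop (membership-tested linking into the growing tree) by a
-- two-pass decomposition: first a node-to-parent map, then one scan building the tree. Alternative
-- decomposition, same cost; return values proved identical.

-- {'children': set()}  (shared literal of both programs)
def pvEmptyNode : PySem.Dict String (PySem.Set String) :=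
  PySem.Dict.insert PySem.Dict.empty "children" PySem.Set.empty

-- ===== PORT A =====
-- inner loop 'for i in range(1,len(all_p))', walking the prefix list with its predecessor
def pvLinkA : PySem.Dict String (PySem.Dict String (PySem.Set String)) → String → List String →
    PySem.Dict String (PySem.Dict String (PySem.Set String))
  | tree, _, [] => tree
  | tree, prev, x :: rest =>
    pvLinkA
      (if tree.contains x then tree
       else PySem.Dict.modify (tree.insert x pvEmptyNode) prev pvEmptyNode
              (fun nd => PySem.Dict.modify nd "children" PySem.Set.empty
                (fun s => PySem.Set.union s [x])))
      x rest

def compute_tree_from_d (ds : List String) : List (String × List (String × List String)) :=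
  let tree0 := PySem.Dict.insert (PySem.Dict.empty) "" pvEmptyNode
  let d := PySem.List.sorted ds (fun s => s) false
  let tree := d.foldl (fun tree t =>
    let v := (PySem.Str.split? t ".").getD []   -- t.split('.'); sep "." ≠ "" so split? is always `some`
    -- all_p = [''] + ['.'.join(v[0:i+1]) for i in range(len(v))]; v[0:i+1] = v.take (i+1) (bounds ≥ 0)
    pvLinkA tree ""
      ((List.range v.length).map (fun i => PySem.Str.join "." (v.take (i+1))))) tree0
  tree.items.map (fun kv => (kv.1, kv.2.items))

-- ===== PORT B =====
-- inner loop 'for part in parts[1:]': q = p + '.' + part; parent.setdefault(q, p); p = q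
def pvCollectB : PySem.Dict String String → String → List String → PySem.Dict String String
  | m, _, [] => m
  | m, p, part :: rest =>
    pvCollectB (m.setdefault (p ++ "." ++ part) p) (p ++ "." ++ part) rest

def compute_tree_from_d_alt (ds : List String) : List (String × List (String × List String)) :=
  let parent := (PySem.List.sorted ds (fun s => s) false).foldl (fun m t =>
    match (PySem.Str.split? t ".").getD [] with   -- t.split('.'); never []
    | [] => m
    | p0 :: rest => pvCollectB (m.setdefault p0 "") p0 rest) PySem.Dict.empty
  let tree := parent.items.foldl (fun tree kv =>
    if kv.1 = "" then tree
    else PySem.Dict.modify (tree.setdefault kv.1 pvEmptyNode) kv.2 pvEmptyNode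
          (fun nd => PySem.Dict.modify nd "children" PySem.Set.empty
            (fun s => PySem.Set.add s kv.1)))
    (PySem.Dict.insert (PySem.Dict.empty) "" pvEmptyNode)
  tree.items.map (fun kv => (kv.1, kv.2.items))

-- ===== PRECONDITION & SPEC =====
def Spec_compute_tree_from_d (ds : List String) (out : List (String × List (String × List String))) : Prop := out = compute_tree_from_d_alt ds
instance (ds : List String) (out : List (String × List (String × List String))) : Decidable (Spec_compute_tree_from_d ds out) := by unfold Spec_compute_tree_from_d; infer_instance

-- ===== CLAIM (what is proved, stated in full; the proofs are below) =====
def Claim_equal_compute_tree_from_d : Prop := ∀ (ds : List String), Dom_compute_tree_from_d ds → Spec_compute_tree_from_d ds (compute_tree_from_d ds)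

-- ===== LEMMAS AND PROOFS =====

-- proof-side views of the two loop bodies
def pvStepA (tree : PySem.Dict String (PySem.Dict String (PySem.Set String)))
    (pr : String × String) : PySem.Dict String (PySem.Dict String (PySem.Set String)) :=
  if tree.contains pr.2 then tree
  else PySem.Dict.modify (tree.insert pr.2 pvEmptyNode) pr.1 pvEmptyNode
        (fun nd => PySem.Dict.modify nd "children" PySem.Set.empty
          (fun s => PySem.Set.union s [pr.2]))

def pvStepB (tree : PySem.Dict String (PySem.Dict String (PySem.Set String)))
    (kv : String × String) : PySem.Dict String (PySem.Dict String (PySem.Set String)) :=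
  if kv.1 = "" then tree
  else PySem.Dict.modify (tree.setdefault kv.1 pvEmptyNode) kv.2 pvEmptyNode
        (fun nd => PySem.Dict.modify nd "children" PySem.Set.empty
          (fun s => PySem.Set.add s kv.1))

def pvPairs : String → List String → List (String × String)
  | _, [] => []
  | p, x :: xs => (p, x) :: pvPairs x xs

def pvIncr : String → List String → List String
  | _, [] => []
  | p, x :: xs => (p ++ "." ++ x) :: pvIncr (p ++ "." ++ x) xs

def pvTree0 : PySem.Dict String (PySem.Dict String (PySem.Set String)) :=
  PySem.Dict.insert (PySem.Dict.empty) "" pvEmptyNode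

def pvBT (m : PySem.Dict String String) : PySem.Dict String (PySem.Dict String (PySem.Set String)) :=
  m.items.foldl pvStepB pvTree0

def pvDD (m : PySem.Dict String String) (E : List (String × String)) : PySem.Dict String String :=
  E.foldl (fun m pr => m.setdefault pr.2 pr.1) m

def pvParOK (m : PySem.Dict String String) : Prop :=
  ∀ pr ∈ m.items, pr.2 = "" ∨ m.contains pr.2 = true

def pvStreamOK : PySem.Dict String String → List (String × String) → Prop
  | _, [] => True
  | m, (p, x) :: E => (p = "" ∨ m.contains p = true ∨ p = x) ∧ pvStreamOK (m.setdefault x p) E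

def pvFA (tree : PySem.Dict String (PySem.Dict String (PySem.Set String))) (t : String) :
    PySem.Dict String (PySem.Dict String (PySem.Set String)) :=
  let v := (PySem.Str.split? t ".").getD []
  pvLinkA tree "" ((List.range v.length).map (fun i => PySem.Str.join "." (v.take (i+1))))

def pvFB (m : PySem.Dict String String) (t : String) : PySem.Dict String String :=
  match (PySem.Str.split? t ".").getD [] with
  | [] => m
  | p0 :: rest => pvCollectB (m.setdefault p0 "") p0 rest

-- string join facts
lemma pv_join_singleton (a : String) : PySem.Str.join "." [a] = a := by
  apply String.toList_inj.mp
  simp [PySem.Str.toList_join, PySem.Chars.join_singleton]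

lemma pv_join_cons_cons (a b : String) (l : List String) :
    PySem.Str.join "." (a :: b :: l) = a ++ "." ++ PySem.Str.join "." (b :: l) := by
  apply String.toList_inj.mp
  simp [PySem.Str.toList_join, PySem.Chars.join_cons_cons, String.toList_append]

lemma pv_join_glue (a b : String) (l : List String) :
    PySem.Str.join "." ((a ++ "." ++ b) :: l) = a ++ "." ++ PySem.Str.join "." (b :: l) := by
  cases l with
  | nil => rw [pv_join_singleton, pv_join_singleton]
  | cons c l =>
    rw [pv_join_cons_cons, pv_join_cons_cons]
    apply String.toList_inj.mp
    simp [String.toList_append, List.append_assoc]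

-- A's prefix-join list is B's incremental prefix list
lemma pv_jlist_eq : ∀ (rest : List String) (p0 : String),
    (List.range (p0 :: rest).length).map (fun i => PySem.Str.join "." ((p0 :: rest).take (i+1)))
      = p0 :: pvIncr p0 rest := by
  intro rest
  induction rest with
  | nil => intro p0; simp [pvIncr, pv_join_singleton]
  | cons x rest ih =>
    intro p0
    have hlen : (p0 :: x :: rest).length = (rest.length + 1) + 1 := by simp
    rw [hlen, List.range_succ_eq_map, List.map_cons, List.map_map]
    have htail : ∀ i ∈ List.range (rest.length + 1),
        ((fun i => PySem.Str.join "." ((p0 :: x :: rest).take (i+1))) ∘ Nat.succ) i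
          = (fun i => PySem.Str.join "." (((p0 ++ "." ++ x) :: rest).take (i+1))) i := by
      intro i _
      simp only [Function.comp, List.take_succ_cons]
      rw [pv_join_cons_cons, pv_join_glue]
    rw [List.map_congr_left htail]
    have hlen2 : rest.length + 1 = ((p0 ++ "." ++ x) :: rest).length := by simp
    rw [hlen2, ih (p0 ++ "." ++ x)]
    simp [pvIncr, pv_join_singleton]

-- the two inner loops as folds over the (parent, node) pair stream
lemma pv_linkA_eq_foldl : ∀ (l : List String) tree (p : String),
    pvLinkA tree p l = List.foldl pvStepA tree (pvPairs p l) := by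
  intro l
  induction l with
  | nil => intro tree p; rfl
  | cons x xs ih =>
    intro tree p
    simp only [pvLinkA, pvPairs, List.foldl_cons]
    rw [ih]
    rfl

lemma pv_collectB_eq_dd : ∀ (rest : List String) m (p : String),
    pvCollectB m p rest = pvDD m (pvPairs p (pvIncr p rest)) := by
  intro rest
  induction rest with
  | nil => intro m p; rfl
  | cons part rest ih =>
    intro m p
    simp only [pvCollectB, pvIncr, pvPairs, pvDD, List.foldl_cons]
    exact ih _ _

-- key characterization: which keys the second pass has created
lemma pv_bt_contains_aux : ∀ (l : List (String × String)) tree (x : String),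
    (List.foldl pvStepB tree l).contains x = true ↔
      (tree.contains x = true ∨ ∃ pr ∈ l, pr.1 ≠ "" ∧ (pr.1 = x ∨ pr.2 = x)) := by
  intro l
  induction l with
  | nil => intro tree x; simp
  | cons pr l ih =>
    intro tree x
    obtain ⟨n, p⟩ := pr
    rw [List.foldl_cons, ih]
    by_cases hn : n = ""
    · subst hn
      simp [pvStepB]
    · simp only [pvStepB, if_neg hn]
      simp only [PySem.Dict.contains_modify, PySem.Dict.contains_setdefault]
      simp only [Bool.or_eq_true, beq_iff_eq, List.mem_cons]
      constructor
      · rintro ((h2 | (h2 | ht)) | ⟨q, hq, h1, h2⟩)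
        · exact Or.inr ⟨(n, p), Or.inl rfl, hn, Or.inr h2.symm⟩
        · exact Or.inr ⟨(n, p), Or.inl rfl, hn, Or.inl h2.symm⟩
        · exact Or.inl ht
        · exact Or.inr ⟨q, Or.inr hq, h1, h2⟩
      · rintro (ht | ⟨q, (rfl | hq), h1, h2⟩)
        · exact Or.inl (Or.inr (Or.inr ht))
        · rcases h2 with h2 | h2
          · exact Or.inl (Or.inr (Or.inl h2.symm))
          · exact Or.inl (Or.inl h2.symm)
        · exact Or.inr ⟨q, hq, h1, h2⟩

lemma pv_parOK_empty : pvParOK PySem.Dict.empty := by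
  intro pr hpr
  have h : (PySem.Dict.empty : PySem.Dict String String).items = [] := rfl
  rw [h] at hpr
  cases hpr

lemma pv_contains_iff_items (m : PySem.Dict String String) (x : String) :
    m.contains x = true ↔ ∃ pr ∈ m.items, pr.1 = x := by
  rw [PySem.Dict.contains_iff_mem_keys]
  have h : m.keys = m.items.map (·.1) := rfl
  rw [h]
  simp [eq_comm]

lemma pv_bt_contains (m : PySem.Dict String String) (h : pvParOK m) (x : String) :
    ((pvBT m).contains x = true) ↔ (x = "" ∨ m.contains x = true) := by
  unfold pvBT
  rw [pv_bt_contains_aux]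
  have h0 : (pvTree0.contains x = true) ↔ x = "" := by
    simp [pvTree0, PySem.Dict.contains_insert]
  rw [h0]
  constructor
  · rintro (hx | ⟨pr, hmem, hne, h1 | h2⟩)
    · exact Or.inl hx
    · exact Or.inr ((pv_contains_iff_items m x).mpr ⟨pr, hmem, h1⟩)
    · rcases h pr hmem with h3 | h3
      · exact Or.inl (h2 ▸ h3)
      · exact Or.inr (h2 ▸ h3)
  · rintro (rfl | hx)
    · exact Or.inl rfl
    · rcases (pv_contains_iff_items m x).mp hx with ⟨pr, hmem, h1⟩
      by_cases hne : pr.1 = ""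
      · exact Or.inl (by rw [← h1, hne])
      · exact Or.inr ⟨pr, hmem, hne, Or.inl h1⟩

lemma pv_parOK_step {m : PySem.Dict String String} {p x : String}
    (h : pvParOK m) (hp : p = "" ∨ m.contains p = true ∨ p = x) :
    pvParOK (m.setdefault x p) := by
  by_cases hc : m.contains x = true
  · rwa [PySem.Dict.setdefault_of_contains m p hc]
  · have hc' : m.contains x = false := by simpa using hc
    rw [PySem.Dict.setdefault_of_not_contains m p hc']
    intro pr hpr
    rw [PySem.Dict.items_insert_of_not_contains m p hc'] at hpr
    rcases List.mem_append.mp hpr with hmem | hnew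
    · rcases h pr hmem with h1 | h1
      · exact Or.inl h1
      · right; simp [PySem.Dict.contains_insert, h1]
    · have hpr2 : pr = (x, p) := by simpa using hnew
      subst hpr2
      rcases hp with h1 | h1 | h1
      · exact Or.inl h1
      · right; simp [PySem.Dict.contains_insert, h1]
      · right; simp [h1]

lemma pv_main : ∀ (E : List (String × String)) (m : PySem.Dict String String),
    pvParOK m → pvStreamOK m E →
    List.foldl pvStepA (pvBT m) E = pvBT (pvDD m E) := by
  intro E
  induction E with
  | nil => intro m _ _; rfl
  | cons pr E ih =>
    intro m hP hS
    obtain ⟨p, x⟩ := pr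
    obtain ⟨hp, hS'⟩ := hS
    have hstep : pvStepA (pvBT m) (p, x) = pvBT (m.setdefault x p) := by
      by_cases hc : m.contains x = true
      · rw [PySem.Dict.setdefault_of_contains m p hc]
        have h1 : (pvBT m).contains x = true := (pv_bt_contains m hP x).mpr (Or.inr hc)
        simp [pvStepA, h1]
      · have hc' : m.contains x = false := by simpa using hc
        rw [PySem.Dict.setdefault_of_not_contains m p hc']
        by_cases hx : x = ""
        · subst hx
          have h1 : (pvBT m).contains "" = true := (pv_bt_contains m hP "").mpr (Or.inl rfl)
          have h2 : pvBT (m.insert "" p) = pvBT m := by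
            unfold pvBT
            rw [PySem.Dict.items_insert_of_not_contains m p hc', List.foldl_append]
            simp [pvStepB]
          rw [h2]
          simp [pvStepA, h1]
        · have h1 : (pvBT m).contains x = false := by
            have hnot : ¬ ((pvBT m).contains x = true) := by
              intro hcontra
              rcases (pv_bt_contains m hP x).mp hcontra with h2 | h2
              · exact hx h2
              · rw [hc'] at h2; cases h2
            simpa using hnot
          have h2 : pvBT (m.insert x p) = pvStepB (pvBT m) (x, p) := by
            unfold pvBT
            rw [PySem.Dict.items_insert_of_not_contains m p hc', List.foldl_append]
            rfl
          rw [h2]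
          simp only [pvStepA, pvStepB, h1, Bool.false_eq_true, if_false, if_neg hx]
          rw [PySem.Dict.setdefault_of_not_contains (pvBT m) pvEmptyNode h1]
          rfl
    rw [List.foldl_cons, hstep]
    have hdd : pvDD m ((p, x) :: E) = pvDD (m.setdefault x p) E := rfl
    rw [hdd]
    exact ih (m.setdefault x p) (pv_parOK_step hP hp) hS'

lemma pv_streamOK_chain : ∀ (rest : List String) (p : String) m,
    m.contains p = true → pvStreamOK m (pvPairs p (pvIncr p rest)) := by
  intro rest
  induction rest with
  | nil => intro p m _; trivial
  | cons part rest ih =>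
    intro p m hp
    refine ⟨Or.inr (Or.inl hp), ?_⟩
    apply ih
    simp [PySem.Dict.contains_setdefault]

lemma pv_streamOK_full (p0 : String) (rest : List String) (m : PySem.Dict String String) :
    pvStreamOK m (pvPairs "" (p0 :: pvIncr p0 rest)) := by
  refine ⟨Or.inl rfl, ?_⟩
  apply pv_streamOK_chain
  simp [PySem.Dict.contains_setdefault]

lemma pv_parOK_dd : ∀ (E : List (String × String)) (m : PySem.Dict String String),
    pvParOK m → pvStreamOK m E → pvParOK (pvDD m E) := by
  intro E
  induction E with
  | nil => intro m h _; exact h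
  | cons pr E ih =>
    intro m hP hS
    obtain ⟨p, x⟩ := pr
    obtain ⟨hp, hS'⟩ := hS
    exact ih _ (pv_parOK_step hP hp) hS'

lemma pv_outer : ∀ (d : List String) (m : PySem.Dict String String), pvParOK m →
    List.foldl pvFA (pvBT m) d = pvBT (List.foldl pvFB m d) := by
  intro d
  induction d with
  | nil => intro m _; rfl
  | cons t d ih =>
    intro m hP
    rw [List.foldl_cons, List.foldl_cons]
    rcases hv : (PySem.Str.split? t ".").getD [] with _ | ⟨p0, rest⟩
    · have hA : pvFA (pvBT m) t = pvBT m := by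
        simp [pvFA, hv, pvLinkA]
      have hB : pvFB m t = m := by
        simp [pvFB, hv]
      rw [hA, hB]
      exact ih m hP
    · have hSOK : pvStreamOK m (pvPairs "" (p0 :: pvIncr p0 rest)) := pv_streamOK_full p0 rest m
      have hBval : pvFB m t = pvDD m (pvPairs "" (p0 :: pvIncr p0 rest)) := by
        simp only [pvFB, hv]
        rw [pv_collectB_eq_dd]
        rfl
      have hA : pvFA (pvBT m) t = pvBT (pvFB m t) := by
        simp only [pvFA, hv]
        rw [pv_jlist_eq, pv_linkA_eq_foldl, pv_main _ _ hP hSOK, hBval]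
      rw [hA]
      apply ih
      rw [hBval]
      exact pv_parOK_dd _ _ hP hSOK

-- ===== VERDICT (by name: the statement is the Claim_ definition above) =====
theorem compute_tree_from_d_spec : Claim_equal_compute_tree_from_d := by
  intro ds _
  show compute_tree_from_d ds = compute_tree_from_d_alt ds
  show (List.foldl pvFA pvTree0 (PySem.List.sorted ds (fun s => s) false)).items.map
        (fun kv => (kv.1, kv.2.items))
      = (pvBT (List.foldl pvFB PySem.Dict.empty (PySem.List.sorted ds (fun s => s) false))).items.map
        (fun kv => (kv.1, kv.2.items))
  have h0 : pvBT PySem.Dict.empty = pvTree0 := rfl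
  rw [← h0, pv_outer _ _ pv_parOK_empty]
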